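-- pv_equiv track=rewrite | github.com/NewLouwa/Mega_Import_Plugin | mega_import.py | _folder_aggregates
-- ===== SOURCE A (Python) =====
-- def _folder_aggregates(folder_id, files, children_idx, memo):
--     """Recursive (file_count, total_size) for everything under folder_id."""
--     if folder_id in memo:
--         return memo[folder_id]
--     total_files = 0
--     total_size = 0
--     stack = [folder_id]
--     seen = set()
--     while stack:
--         cur = stack.pop()
--         if cur in seen:
--             continue
--         seen.add(cur)
--         for cid in children_idx.get(cur, ()):
--             child = files.get(cid)
--             if not child:
--                 continue
--             t = child.get("t", 0)
--             if t == 0:  # file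
--                 total_files += 1
--                 total_size += child.get("s") or 0
--             elif t == 1:  # folder
--                 stack.append(cid)
--     memo[folder_id] = (total_files, total_size)
--     return total_files, total_size
-- ===== SOURCE B (Python) =====
-- def _folder_aggregates(folder_id, files, children_idx, memo):
--     """Recursive (file_count, total_size) for everything under folder_id.
--
--     Fixpoint formulation: first saturate the set of reachable folders by
--     iterating the one-step child-folder map until nothing new appears, then
--     total up the file children of every reached folder in one separate pass.
--     (Same memo side effect as the original: stores the result under folder_id.)
--     """
--     if folder_id in memo:
--         return memo[folder_id]
--
--     def child_entries(u):
--         out = []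
--         for cid in children_idx.get(u, ()):
--             child = files.get(cid)
--             if child:
--                 out.append((cid, child.get("t", 0), child))
--         return out
--
--     reached = {folder_id}
--     budget = sum(len(v) for v in children_idx.values())
--     for _ in range(budget):
--         new = {cid for u in reached for (cid, t, _) in child_entries(u) if t == 1} - reached
--         if not new:
--             break
--         reached |= new
--
--     total_files = 0
--     total_size = 0
--     for u in reached:
--         for (cid, t, child) in child_entries(u):
--             if t == 0:
--                 total_files += 1
--                 total_size += child.get("s") or 0
--
--     memo[folder_id] = (total_files, total_size)
--     return total_files, total_size
-- ===== Notes on version B (the rewrite author's own statement) =====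
-- stated objective: alternative
-- what changed: Replaces the explicit DFS stack interleaved with counting by a two-phase fixpoint computation: saturate the set of reachable folders by iterating the one-step child-folder map (with early exit when nothing new appears), then sum file counts/sizes over that set in a separate pass.
import Mathlib
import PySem

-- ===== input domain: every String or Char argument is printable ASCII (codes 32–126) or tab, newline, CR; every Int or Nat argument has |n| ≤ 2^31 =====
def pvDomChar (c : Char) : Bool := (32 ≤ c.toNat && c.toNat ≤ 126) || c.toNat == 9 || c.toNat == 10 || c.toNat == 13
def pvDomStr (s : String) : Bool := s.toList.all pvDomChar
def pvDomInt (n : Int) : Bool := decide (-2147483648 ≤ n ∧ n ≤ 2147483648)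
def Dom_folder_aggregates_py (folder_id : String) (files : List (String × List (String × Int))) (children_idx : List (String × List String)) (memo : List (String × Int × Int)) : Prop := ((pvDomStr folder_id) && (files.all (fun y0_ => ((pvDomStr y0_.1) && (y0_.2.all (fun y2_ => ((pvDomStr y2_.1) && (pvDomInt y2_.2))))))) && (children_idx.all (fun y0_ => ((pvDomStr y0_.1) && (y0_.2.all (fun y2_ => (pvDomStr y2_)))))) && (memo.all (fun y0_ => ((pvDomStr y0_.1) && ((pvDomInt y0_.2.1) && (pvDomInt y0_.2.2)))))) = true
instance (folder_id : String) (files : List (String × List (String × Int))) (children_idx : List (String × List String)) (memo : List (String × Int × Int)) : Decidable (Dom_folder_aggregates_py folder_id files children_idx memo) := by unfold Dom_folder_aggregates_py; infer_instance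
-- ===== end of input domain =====

-- B replaces A's DFS stack interleaved with counting by a two-phase fixpoint computation
-- (saturate the set of reachable folders, then sum the file children of that set);
-- equivalence is about the RETURN value only (both Pythons also store it in memo identically).

-- ===== PORT A =====
-- A's inner `for cid in children_idx.get(cur, ())` loop body, acting on (stack-tail, total_files, total_size)
def pvStepA (fs : PySem.Dict String (List (String × Int))) (st : List String × Int × Int) (cid : String) : List String × Int × Int :=
  match fs.get? cid with
  | none => st                                     -- `if not child: continue` (missing)
  | some child =>
    if child = [] then st                          -- `if not child: continue` (empty dict)
    else
      let t := (PySem.Dict.mk child).getD "t" 0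
      if t = 0 then (st.1, st.2.1 + 1, st.2.2 + ((PySem.Dict.mk child).get? "s").getD 0)
        -- `child.get("s") or 0` : None and the falsy int 0 both yield 0, so `.getD 0` is exact
      else if t = 1 then (cid :: st.1, st.2.1, st.2.2)
      else st

-- spec-shaped helpers (used by pvFoldA_spec, which the port cites for its stack invariant)
def pvIsFile (fs : PySem.Dict String (List (String × Int))) (cid : String) : Bool :=
  match fs.get? cid with
  | some child => !child.isEmpty && ((PySem.Dict.mk child).getD "t" 0 == 0)
  | none => false

def pvIsFolder (fs : PySem.Dict String (List (String × Int))) (cid : String) : Bool :=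
  match fs.get? cid with
  | some child => !child.isEmpty && ((PySem.Dict.mk child).getD "t" 0 == 1)
  | none => false

def pvSzOf (fs : PySem.Dict String (List (String × Int))) (cid : String) : Int :=
  match fs.get? cid with
  | some child => ((PySem.Dict.mk child).get? "s").getD 0
  | none => 0

def pvCnt (fs : PySem.Dict String (List (String × Int))) (cs : List String) : Int :=
  ((cs.countP (pvIsFile fs) : Nat) : Int)

def pvSz (fs : PySem.Dict String (List (String × Int))) (cs : List String) : Int :=
  (cs.map (fun cid => if pvIsFile fs cid then pvSzOf fs cid else 0)).sum

def pvFolderKids (fs : PySem.Dict String (List (String × Int))) (cs : List String) : List String :=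
  cs.filter (pvIsFolder fs)

lemma pvStepA_eq (fs : PySem.Dict String (List (String × Int))) (st : List String × Int × Int) (cid : String) :
    pvStepA fs st cid =
      ((if pvIsFolder fs cid then cid :: st.1 else st.1),
       st.2.1 + (if pvIsFile fs cid then 1 else 0),
       st.2.2 + (if pvIsFile fs cid then pvSzOf fs cid else 0)) := by
  unfold pvStepA pvIsFile pvIsFolder pvSzOf
  cases h : fs.get? cid
  · simp
  · next child =>
    by_cases hc : child = []
    · simp [hc]
    · simp only []
      by_cases ht0 : (PySem.Dict.mk child).getD "t" 0 = 0
      · simp [ht0, hc]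
      · by_cases ht1 : (PySem.Dict.mk child).getD "t" 0 = 1
        · simp [ht1, hc]
        · simp [ht0, ht1, hc]

lemma pvFoldA_spec (fs : PySem.Dict String (List (String × Int))) (cs : List String) :
    ∀ (s0 : List String) (a0 b0 : Int),
      cs.foldl (pvStepA fs) (s0, a0, b0)
        = ((pvFolderKids fs cs).reverse ++ s0, a0 + pvCnt fs cs, b0 + pvSz fs cs) := by
  induction cs with
  | nil => intro s0 a0 b0; simp [pvFolderKids, pvCnt, pvSz]
  | cons c cs ih =>
    intro s0 a0 b0
    rw [List.foldl_cons, pvStepA_eq, ih]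
    unfold pvFolderKids pvCnt pvSz
    by_cases hfo : pvIsFolder fs c <;> by_cases hfi : pvIsFile fs c <;>
      simp [hfo, hfi] <;>
      constructor <;> ring

-- universe of ids the DFS can ever see (termination measure only)
def pvUniv (fid : String) (ci : PySem.Dict String (List String)) : Finset String :=
  insert fid ci.values.flatten.toFinset

lemma pvGetD_mem_flatten (ci : PySem.Dict String (List String)) (k x : String)
    (hx : x ∈ ci.getD k []) : x ∈ ci.values.flatten := by
  unfold PySem.Dict.getD PySem.Dict.get? at hx
  cases h : List.find? (fun p => p.1 == k) ci.items with
  | none => rw [h] at hx; simp at hx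
  | some p =>
    rw [h] at hx
    simp only [Option.map_some, Option.getD_some] at hx
    have hmem : p ∈ ci.items := List.mem_of_find?_eq_some h
    exact List.mem_flatten.mpr ⟨p.2, List.mem_map.mpr ⟨p, hmem, rfl⟩, hx⟩

lemma pvContains_iff (s : PySem.Set String) (x : String) :
    PySem.Set.contains s x = true ↔ x ∈ s := PySem.Set.contains_iff s x

lemma pvAdd_toFinset (s : PySem.Set String) (x : String) :
    (PySem.Set.add s x).toFinset = insert x s.toFinset := by
  ext y
  simp [PySem.Set.mem_add, or_comm]

-- A's `while stack:` loop; `stack` has its top at the head (Python pushes/pops at the end)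
def pvLoopA (fs : PySem.Dict String (List (String × Int))) (ci : PySem.Dict String (List String))
    (fid : String) (stack : List String) (seen : PySem.Set String) (tf ts : Int)
    (hstk : ∀ x ∈ stack, x ∈ pvUniv fid ci) : Int × Int :=
  match stack with
  | [] => (tf, ts)
  | cur :: rest =>
    if hc : PySem.Set.contains seen cur then
      pvLoopA fs ci fid rest seen tf ts (fun x hx => hstk x (List.mem_cons_of_mem _ hx))
    else
      pvLoopA fs ci fid ((ci.getD cur []).foldl (pvStepA fs) (rest, tf, ts)).1
        (PySem.Set.add seen cur)
        ((ci.getD cur []).foldl (pvStepA fs) (rest, tf, ts)).2.1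
        ((ci.getD cur []).foldl (pvStepA fs) (rest, tf, ts)).2.2
        (by
          intro x hx
          rw [pvFoldA_spec] at hx
          rcases List.mem_append.mp hx with h | h
          · have : x ∈ ci.getD cur [] := List.mem_of_mem_filter (List.mem_reverse.mp h)
            exact Finset.mem_insert_of_mem (List.mem_toFinset.mpr (pvGetD_mem_flatten ci cur x this))
          · exact hstk x (List.mem_cons_of_mem _ h))
termination_by ((pvUniv fid ci \ seen.toFinset).card, stack.length)
decreasing_by
  · apply Prod.Lex.right
    simp
  · apply Prod.Lex.left
    rw [pvAdd_toFinset]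
    apply Finset.card_lt_card
    constructor
    · intro y hy
      simp only [Finset.mem_sdiff, Finset.mem_insert] at hy ⊢
      exact ⟨hy.1, fun h => hy.2 (Or.inr h)⟩
    · intro hsub
      have hcur : cur ∈ pvUniv fid ci \ seen.toFinset := by
        simp only [Finset.mem_sdiff]
        refine ⟨hstk cur List.mem_cons_self, ?_⟩
        intro hmem
        exact hc ((pvContains_iff seen cur).mpr (List.mem_toFinset.mp hmem))
      have := hsub hcur
      simp only [Finset.mem_sdiff, Finset.mem_insert] at this
      exact this.2 (Or.inl trivial)

def folder_aggregates_py (folder_id : String) (files : List (String × List (String × Int))) (children_idx : List (String × List String)) (memo : List (String × Int × Int)) : Int × Int :=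
  match (PySem.Dict.mk memo).get? folder_id with
  | some v => v                                    -- `if folder_id in memo: return memo[folder_id]`
  | none =>
    pvLoopA (PySem.Dict.mk files) (PySem.Dict.mk children_idx) folder_id [folder_id]
      PySem.Set.empty 0 0
      (by intro x hx; simp only [List.mem_singleton] at hx; subst hx; exact Finset.mem_insert_self _ _)

-- ===== PORT B =====
-- Source B's `child_entries(u)`: the truthy file records of u's children, as (cid, t, child)
def pvChildEntries (fs : PySem.Dict String (List (String × Int))) (ci : PySem.Dict String (List String)) (u : String) : List (String × Int × List (String × Int)) :=
  (ci.getD u []).filterMap (fun cid =>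
    match fs.get? cid with
    | some child => if child = [] then none else some (cid, (PySem.Dict.mk child).getD "t" 0, child)
    | none => none)

-- one saturation step: `{cid for u in reached for (cid, t, _) in child_entries(u) if t == 1} - reached`
def pvNewFolders (fs : PySem.Dict String (List (String × Int))) (ci : PySem.Dict String (List String)) (reached : PySem.Set String) : PySem.Set String :=
  PySem.Set.diff
    (PySem.Set.ofList (reached.flatMap (fun u =>
      (pvChildEntries fs ci u).filterMap (fun e => if e.2.1 = 1 then some e.1 else none))))
    reached

-- `for _ in range(budget): … if not new: break; reached |= new`
def pvSaturate (fs : PySem.Dict String (List (String × Int))) (ci : PySem.Dict String (List String)) : Nat → PySem.Set String → PySem.Set String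
  | 0, r => r
  | Nat.succ n, r =>
    if (pvNewFolders fs ci r).isEmpty then r
    else pvSaturate fs ci n (PySem.Set.union r (pvNewFolders fs ci r))

-- second phase: total up the file children of every reached folder
def pvSumFiles (fs : PySem.Dict String (List (String × Int))) (ci : PySem.Dict String (List String)) (reached : PySem.Set String) : Int × Int :=
  reached.foldl (fun acc u =>
    (pvChildEntries fs ci u).foldl (fun acc e =>
      if e.2.1 = 0 then (acc.1 + 1, acc.2 + ((PySem.Dict.mk e.2.2).get? "s").getD 0) else acc) acc)
    (0, 0)

def folder_aggregates_py_alt (folder_id : String) (files : List (String × List (String × Int))) (children_idx : List (String × List String)) (memo : List (String × Int × Int)) : Int × Int :=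
  match (PySem.Dict.mk memo).get? folder_id with
  | some v => v
  | none =>
    pvSumFiles (PySem.Dict.mk files) (PySem.Dict.mk children_idx)
      (pvSaturate (PySem.Dict.mk files) (PySem.Dict.mk children_idx)
        (((PySem.Dict.mk children_idx).values.map List.length).sum)
        (PySem.Set.ofList [folder_id]))

-- ===== PRECONDITION & SPEC =====
def Spec_folder_aggregates_py (folder_id : String) (files : List (String × List (String × Int))) (children_idx : List (String × List String)) (memo : List (String × Int × Int)) (out : Int × Int) : Prop := out = folder_aggregates_py_alt folder_id files children_idx memo
instance (folder_id : String) (files : List (String × List (String × Int))) (children_idx : List (String × List String)) (memo : List (String × Int × Int)) (out : Int × Int) : Decidable (Spec_folder_aggregates_py folder_id files children_idx memo out) := by unfold Spec_folder_aggregates_py; infer_instance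

-- ===== CLAIM (what is proved, stated in full; the proofs are below) =====
def Claim_equal_folder_aggregates_py : Prop := ∀ (folder_id : String) (files : List (String × List (String × Int))) (children_idx : List (String × List String)) (memo : List (String × Int × Int)), Dom_folder_aggregates_py folder_id files children_idx memo → Spec_folder_aggregates_py folder_id files children_idx memo (folder_aggregates_py folder_id files children_idx memo)

-- ===== LEMMAS AND PROOFS =====

-- the folder children of u, and u's (file-count, size) contribution
def pvKids (fs : PySem.Dict String (List (String × Int))) (ci : PySem.Dict String (List String)) (u : String) : List String :=
  pvFolderKids fs (ci.getD u [])

def pvContrib (fs : PySem.Dict String (List (String × Int))) (ci : PySem.Dict String (List String)) (u : String) : Int × Int :=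
  (pvCnt fs (ci.getD u []), pvSz fs (ci.getD u []))

-- reachability along folder-child edges
inductive pvReach (fs : PySem.Dict String (List (String × Int))) (ci : PySem.Dict String (List String)) : String → String → Prop
  | refl (x : String) : pvReach fs ci x x
  | step {x y z : String} : pvReach fs ci x y → z ∈ pvKids fs ci y → pvReach fs ci x z

def pvReachL (fs : PySem.Dict String (List (String × Int))) (ci : PySem.Dict String (List String)) (roots : List String) (x : String) : Prop :=
  ∃ r ∈ roots, pvReach fs ci r x

lemma pvReach_trans {fs : PySem.Dict String (List (String × Int))} {ci : PySem.Dict String (List String)} {a b c : String}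
    (h1 : pvReach fs ci a b) (h2 : pvReach fs ci b c) : pvReach fs ci a c := by
  induction h2 with
  | refl => exact h1
  | step _ hz ih => exact pvReach.step ih hz

lemma pvReach_unfold {fs : PySem.Dict String (List (String × Int))} {ci : PySem.Dict String (List String)} {u x : String}
    (h : pvReach fs ci u x) : x = u ∨ ∃ c ∈ pvKids fs ci u, pvReach fs ci c x := by
  induction h with
  | refl => exact Or.inl rfl
  | step hy hz ih =>
    rcases ih with rfl | ⟨c, hc, hcx⟩
    · exact Or.inr ⟨_, hz, pvReach.refl _⟩
    · exact Or.inr ⟨c, hc, pvReach.step hcx hz⟩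

lemma pvEscape {fs : PySem.Dict String (List (String × Int))} {ci : PySem.Dict String (List String)}
    {stack : List String} {seen : PySem.Set String}
    (I : ∀ u ∈ seen, ∀ c ∈ pvKids fs ci u, c ∈ seen ∨ c ∈ stack)
    {x : String} (hx : pvReachL fs ci stack x) (hxs : x ∉ seen) :
    ∃ r ∈ stack, r ∉ seen ∧ pvReach fs ci r x := by
  obtain ⟨r, hr, hrx⟩ := hx
  induction hrx with
  | refl => exact ⟨r, hr, hxs, pvReach.refl r⟩
  | step hy hz ih =>
    rename_i y z
    by_cases hys : y ∈ seen
    · rcases I y hys z hz with hzs | hzk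
      · exact absurd hzs hxs
      · exact ⟨z, hzk, hxs, pvReach.refl z⟩
    · obtain ⟨r', hr', hr's, hr'y⟩ := ih hys
      exact ⟨r', hr', hr's, pvReach.step hr'y hz⟩

lemma pvLoopA_spec (fs : PySem.Dict String (List (String × Int))) (ci : PySem.Dict String (List String)) (fid : String) :
    ∀ (stack : List String) (seen : PySem.Set String) (tf ts : Int)
      (hstk : ∀ x ∈ stack, x ∈ pvUniv fid ci) (S : Finset String),
      (∀ u ∈ seen, ∀ c ∈ pvKids fs ci u, c ∈ seen ∨ c ∈ stack) →
      (∀ x, x ∈ S ↔ (pvReachL fs ci stack x ∧ x ∉ seen)) →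
      pvLoopA fs ci fid stack seen tf ts hstk = (tf + (S.sum (pvContrib fs ci)).1, ts + (S.sum (pvContrib fs ci)).2) := by
  intro stack seen tf ts hstk
  refine pvLoopA.induct fs ci fid
    (motive := fun stack seen tf ts hstk =>
      ∀ (S : Finset String),
        (∀ u ∈ seen, ∀ c ∈ pvKids fs ci u, c ∈ seen ∨ c ∈ stack) →
        (∀ x, x ∈ S ↔ (pvReachL fs ci stack x ∧ x ∉ seen)) →
        pvLoopA fs ci fid stack seen tf ts hstk
          = (tf + (S.sum (pvContrib fs ci)).1, ts + (S.sum (pvContrib fs ci)).2))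
    ?_ ?_ ?_ stack seen tf ts hstk
  · -- stack = []
    intro seen tf ts hstk _ S hI hS
    have hSempty : S = ∅ := by
      refine Finset.eq_empty_of_forall_notMem fun x hx => ?_
      obtain ⟨⟨r, hr, -⟩, -⟩ := (hS x).1 hx
      exact absurd hr List.not_mem_nil
    rw [pvLoopA, hSempty]
    simp
  · -- cur already seen
    intro seen tf ts cur rest hstk hc _ ih S hI hS
    have hcur : cur ∈ seen := (pvContains_iff seen cur).mp hc
    rw [pvLoopA]
    simp only [dif_pos hc]
    refine ih S ?_ ?_
    · intro u hu c hck
      rcases hI u hu c hck with h | h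
      · exact Or.inl h
      · rcases List.mem_cons.mp h with rfl | h
        · exact Or.inl hcur
        · exact Or.inr h
    · intro x
      rw [hS x]
      constructor
      · rintro ⟨hx, hxs⟩
        obtain ⟨r, hr, hrs, hrx⟩ := pvEscape hI hx hxs
        rcases List.mem_cons.mp hr with rfl | hr
        · exact absurd hcur hrs
        · exact ⟨⟨r, hr, hrx⟩, hxs⟩
      · rintro ⟨⟨r, hr, hrx⟩, hxs⟩
        exact ⟨⟨r, List.mem_cons_of_mem _ hr, hrx⟩, hxs⟩
  · -- process cur
    intro seen tf ts cur rest hstk hc _ ih S hI hS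
    have hcns : cur ∉ seen := fun h => hc ((pvContains_iff seen cur).mpr h)
    have hfold := pvFoldA_spec fs (ci.getD cur []) rest tf ts
    have hkids : pvFolderKids fs (ci.getD cur []) = pvKids fs ci cur := rfl
    have hmem1 : ∀ x, x ∈ (List.foldl (pvStepA fs) (rest, tf, ts) (ci.getD cur [])).1 ↔
        (x ∈ pvKids fs ci cur ∨ x ∈ rest) := by
      intro x
      rw [hfold]
      simp [hkids]
    have hcurS : cur ∈ S :=
      (hS cur).2 ⟨⟨cur, List.mem_cons_self, pvReach.refl cur⟩, hcns⟩
    rw [pvLoopA]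
    simp only [dif_neg hc]
    have hrec := ih (S.erase cur) ?_ ?_
    · rw [hrec, hfold]
      have hsum : S.sum (pvContrib fs ci)
          = pvContrib fs ci cur + (S.erase cur).sum (pvContrib fs ci) :=
        (Finset.add_sum_erase S (pvContrib fs ci) hcurS).symm
      rw [hsum]
      have h1 : (pvContrib fs ci cur).1 = pvCnt fs (ci.getD cur []) := rfl
      have h2 : (pvContrib fs ci cur).2 = pvSz fs (ci.getD cur []) := rfl
      simp only [Prod.fst_add, Prod.snd_add, h1, h2, Prod.mk.injEq]
      constructor <;> ring
    · -- invariant for (seen.add cur, new stack)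
      intro u hu c hck
      rcases (PySem.Set.mem_add seen cur u).mp hu with hu | rfl
      · rcases hI u hu c hck with h | h
        · exact Or.inl ((PySem.Set.mem_add seen cur c).mpr (Or.inl h))
        · rcases List.mem_cons.mp h with rfl | h
          · exact Or.inl ((PySem.Set.mem_add seen c c).mpr (Or.inr rfl))
          · exact Or.inr ((hmem1 c).mpr (Or.inr h))
      · exact Or.inr ((hmem1 c).mpr (Or.inl hck))
    · -- characterisation of S.erase cur
      intro x
      rw [Finset.mem_erase]
      constructor
      · rintro ⟨hxc, hxS⟩
        obtain ⟨⟨r, hr, hrx⟩, hxs⟩ := (hS x).1 hxS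
        refine ⟨?_, fun h => ?_⟩
        · rcases List.mem_cons.mp hr with rfl | hr
          · rcases pvReach_unfold hrx with rfl | ⟨c, hck, hcx⟩
            · exact absurd rfl hxc
            · exact ⟨c, (hmem1 c).mpr (Or.inl hck), hcx⟩
          · exact ⟨r, (hmem1 r).mpr (Or.inr hr), hrx⟩
        · rcases (PySem.Set.mem_add seen cur x).mp h with h | rfl
          · exact hxs h
          · exact hxc rfl
      · rintro ⟨⟨r, hr, hrx⟩, hxadd⟩
        have hxs : x ∉ seen := fun h => hxadd ((PySem.Set.mem_add seen cur x).mpr (Or.inl h))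
        have hxc : x ≠ cur := fun h => hxadd ((PySem.Set.mem_add seen cur x).mpr (Or.inr h))
        refine ⟨hxc, (hS x).2 ⟨?_, hxs⟩⟩
        rcases (hmem1 r).mp hr with hk | hrest
        · exact ⟨cur, List.mem_cons_self, pvReach_trans (pvReach.step (pvReach.refl cur) hk) hrx⟩
        · exact ⟨r, List.mem_cons_of_mem _ hrest, hrx⟩

-- ----- B-side lemmas -----

lemma pvEntries_kids (fs : PySem.Dict String (List (String × Int))) (ci : PySem.Dict String (List String)) (u : String) :
    (pvChildEntries fs ci u).filterMap (fun e => if e.2.1 = 1 then some e.1 else none) = pvKids fs ci u := by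
  unfold pvChildEntries pvKids pvFolderKids
  induction ci.getD u [] with
  | nil => simp
  | cons c cs ih =>
    rw [List.filter_cons]
    simp only [List.filterMap_cons]
    cases h : fs.get? c with
    | none => simpa [pvIsFolder, h] using ih
    | some child =>
      by_cases hc : child = []
      · simpa [pvIsFolder, h, hc] using ih
      · by_cases ht : (PySem.Dict.mk child).getD "t" 0 = 1
        · simpa [pvIsFolder, h, hc, ht] using ih
        · simpa [pvIsFolder, h, hc, ht] using ih

def pvClosed (fs : PySem.Dict String (List (String × Int))) (ci : PySem.Dict String (List String)) (r : List String) : Prop :=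
  ∀ u ∈ r, ∀ c ∈ pvKids fs ci u, c ∈ r

lemma pvNew_empty_closed {fs : PySem.Dict String (List (String × Int))} {ci : PySem.Dict String (List String)} {r : PySem.Set String}
    (h : (pvNewFolders fs ci r).isEmpty) : pvClosed fs ci r := by
  intro u hu c hc
  by_contra hcr
  have hcmem : c ∈ pvNewFolders fs ci r := by
    rw [pvNewFolders, PySem.Set.mem_diff, PySem.Set.mem_ofList]
    refine ⟨List.mem_flatMap.mpr ⟨u, hu, ?_⟩, hcr⟩
    rw [pvEntries_kids]
    exact hc
  rw [List.isEmpty_iff] at h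
  rw [h] at hcmem
  exact absurd hcmem (List.not_mem_nil)

lemma pvNew_mem {fs : PySem.Dict String (List (String × Int))} {ci : PySem.Dict String (List String)} {r : PySem.Set String} {x : String}
    (h : x ∈ pvNewFolders fs ci r) : (∃ u ∈ r, x ∈ pvKids fs ci u) ∧ x ∉ r := by
  rw [pvNewFolders, PySem.Set.mem_diff, PySem.Set.mem_ofList] at h
  obtain ⟨hmem, hnr⟩ := h
  obtain ⟨u, hu, hx⟩ := List.mem_flatMap.mp hmem
  rw [pvEntries_kids] at hx
  exact ⟨⟨u, hu, hx⟩, hnr⟩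

lemma pvSaturate_subset {fs : PySem.Dict String (List (String × Int))} {ci : PySem.Dict String (List String)} :
    ∀ (n : Nat) (r : PySem.Set String) (x : String), x ∈ r → x ∈ pvSaturate fs ci n r := by
  intro n
  induction n with
  | zero => intro r x hx; exact hx
  | succ n ih =>
    intro r x hx
    rw [pvSaturate]
    split
    · exact hx
    · exact ih _ x ((PySem.Set.mem_union _ _ x).mpr (Or.inl hx))

lemma pvSaturate_sound {fs : PySem.Dict String (List (String × Int))} {ci : PySem.Dict String (List String)} {fid : String} :
    ∀ (n : Nat) (r : PySem.Set String), (∀ x ∈ r, pvReach fs ci fid x) →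
      ∀ x ∈ pvSaturate fs ci n r, pvReach fs ci fid x := by
  intro n
  induction n with
  | zero => intro r hr x hx; exact hr x hx
  | succ n ih =>
    intro r hr x hx
    rw [pvSaturate] at hx
    split at hx
    · exact hr x hx
    · refine ih _ ?_ x hx
      intro y hy
      rcases (PySem.Set.mem_union _ _ y).mp hy with h | h
      · exact hr y h
      · obtain ⟨⟨u, hu, hk⟩, -⟩ := pvNew_mem h
        exact pvReach.step (hr u hu) hk

lemma pvSaturate_nodup {fs : PySem.Dict String (List (String × Int))} {ci : PySem.Dict String (List String)} :
    ∀ (n : Nat) (r : PySem.Set String), r.Nodup → (pvSaturate fs ci n r).Nodup := by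
  intro n
  induction n with
  | zero => intro r hr; exact hr
  | succ n ih =>
    intro r hr
    rw [pvSaturate]
    split
    · exact hr
    · exact ih _ (PySem.Set.nodup_union _ _ hr)

lemma pvSaturate_closed {fs : PySem.Dict String (List (String × Int))} {ci : PySem.Dict String (List String)} {fid : String} :
    ∀ (n : Nat) (r : PySem.Set String), (∀ x ∈ r, x ∈ pvUniv fid ci) →
      ((pvUniv fid ci \ r.toFinset).card ≤ n) → pvClosed fs ci (pvSaturate fs ci n r) := by
  intro n
  induction n with
  | zero =>
    intro r hrV hcard
    have hVr : ∀ y ∈ pvUniv fid ci, y ∈ r := by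
      intro y hy
      by_contra hyr
      have : y ∈ pvUniv fid ci \ r.toFinset := Finset.mem_sdiff.mpr ⟨hy, fun h => hyr (List.mem_toFinset.mp h)⟩
      have := Finset.card_pos.mpr ⟨y, this⟩
      omega
    intro u hu c hc
    refine hVr c ?_
    exact Finset.mem_insert_of_mem (List.mem_toFinset.mpr (pvGetD_mem_flatten ci u c (List.mem_of_mem_filter hc)))
  | succ n ih =>
    intro r hrV hcard
    rw [pvSaturate]
    split
    · next h => exact pvNew_empty_closed h
    · next h =>
      refine ih _ ?_ ?_
      · intro x hx
        rcases (PySem.Set.mem_union _ _ x).mp hx with hx | hx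
        · exact hrV x hx
        · obtain ⟨⟨u, hu, hk⟩, -⟩ := pvNew_mem hx
          exact Finset.mem_insert_of_mem (List.mem_toFinset.mpr (pvGetD_mem_flatten ci u x (List.mem_of_mem_filter hk)))
      · obtain ⟨x₀, hx₀⟩ := List.exists_mem_of_ne_nil _ (by simpa [List.isEmpty_iff] using h)
        obtain ⟨-, hx₀r⟩ := pvNew_mem hx₀
        have hx₀V : x₀ ∈ pvUniv fid ci := by
          obtain ⟨⟨u, hu, hk⟩, -⟩ := pvNew_mem hx₀
          exact Finset.mem_insert_of_mem (List.mem_toFinset.mpr (pvGetD_mem_flatten ci u x₀ (List.mem_of_mem_filter hk)))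
        have hsub : pvUniv fid ci \ (PySem.Set.union r (pvNewFolders fs ci r)).toFinset ⊆ pvUniv fid ci \ r.toFinset := by
          intro y hy
          rw [Finset.mem_sdiff] at hy ⊢
          refine ⟨hy.1, fun hyr => hy.2 ?_⟩
          exact List.mem_toFinset.mpr ((PySem.Set.mem_union _ _ y).mpr (Or.inl (List.mem_toFinset.mp hyr)))
        have hlt : (pvUniv fid ci \ (PySem.Set.union r (pvNewFolders fs ci r)).toFinset).card < (pvUniv fid ci \ r.toFinset).card := by
          refine Finset.card_lt_card ⟨hsub, fun hback => ?_⟩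
          have hx₀in : x₀ ∈ pvUniv fid ci \ r.toFinset :=
            Finset.mem_sdiff.mpr ⟨hx₀V, fun hh => hx₀r (List.mem_toFinset.mp hh)⟩
          have := hback hx₀in
          rw [Finset.mem_sdiff] at this
          exact this.2 (List.mem_toFinset.mpr ((PySem.Set.mem_union _ _ x₀).mpr (Or.inr hx₀)))
        omega

def pvEntryOf (fs : PySem.Dict String (List (String × Int))) (cid : String) : Option (String × Int × List (String × Int)) :=
  match fs.get? cid with
  | some child => if child = [] then none else some (cid, (PySem.Dict.mk child).getD "t" 0, child)
  | none => none

lemma pvChildEntries_eq (fs : PySem.Dict String (List (String × Int))) (ci : PySem.Dict String (List String)) (u : String) :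
    pvChildEntries fs ci u = (ci.getD u []).filterMap (pvEntryOf fs) := rfl

lemma pvSumFiles_eq (fs : PySem.Dict String (List (String × Int))) (ci : PySem.Dict String (List String)) (l : List String) :
    pvSumFiles fs ci l = ((l.map (fun u => (pvContrib fs ci u).1)).sum, (l.map (fun u => (pvContrib fs ci u).2)).sum) := by
  have inner : ∀ (cs : List String) (acc : Int × Int),
      (cs.filterMap (pvEntryOf fs)).foldl
        (fun acc (e : String × Int × List (String × Int)) =>
          if e.2.1 = 0 then (acc.1 + 1, acc.2 + ((PySem.Dict.mk e.2.2).get? "s").getD 0) else acc) acc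
      = (acc.1 + pvCnt fs cs, acc.2 + pvSz fs cs) := by
    intro cs
    induction cs with
    | nil => intro acc; simp [pvCnt, pvSz]
    | cons c cs ihc =>
      intro acc
      cases h : fs.get? c with
      | none =>
        rw [List.filterMap_cons_none (by simp [pvEntryOf, h]), ihc acc]
        simp [pvCnt, pvSz, pvIsFile, h]
      | some child =>
        by_cases hc : child = []
        · rw [List.filterMap_cons_none (by simp [pvEntryOf, h, hc]), ihc acc]
          simp [pvCnt, pvSz, pvIsFile, h, hc]
        · rw [List.filterMap_cons_some
            (show pvEntryOf fs c = some (c, (PySem.Dict.mk child).getD "t" 0, child) by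
              simp [pvEntryOf, h, hc]), List.foldl_cons]
          by_cases ht : (PySem.Dict.mk child).getD "t" 0 = 0
          · simp only [ht, if_pos]
            rw [ihc]
            have hfile : pvIsFile fs c = true := by simp [pvIsFile, h, hc, ht]
            have hsz : pvSzOf fs c = ((PySem.Dict.mk child).get? "s").getD 0 := by simp [pvSzOf, h]
            simp only [pvCnt, pvSz, List.countP_cons, List.map_cons, List.sum_cons, hfile, hsz,
              Prod.mk.injEq]
            constructor <;> push_cast <;> ring
          · simp only [if_neg ht]
            rw [ihc]
            have hfile : pvIsFile fs c = false := by simp [pvIsFile, h, hc, ht]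
            simp [pvCnt, pvSz, hfile]
  suffices hout : ∀ (l : List String) (acc : Int × Int),
      l.foldl (fun acc u =>
        (pvChildEntries fs ci u).foldl (fun acc e =>
          if e.2.1 = 0 then (acc.1 + 1, acc.2 + ((PySem.Dict.mk e.2.2).get? "s").getD 0) else acc) acc) acc
      = (acc.1 + (l.map (fun u => (pvContrib fs ci u).1)).sum, acc.2 + (l.map (fun u => (pvContrib fs ci u).2)).sum) by
    rw [pvSumFiles, hout]
    simp
  intro l
  induction l with
  | nil => intro acc; simp
  | cons u l ihl =>
    intro acc
    rw [List.foldl_cons, pvChildEntries_eq, inner, ihl]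
    simp only [pvContrib, List.map_cons, List.sum_cons, Prod.mk.injEq]
    constructor <;> ring

-- ===== VERDICT (by name: the statement is the Claim_ definition above) =====
theorem folder_aggregates_py_spec : Claim_equal_folder_aggregates_py := by
  unfold Claim_equal_folder_aggregates_py
  intro folder_id files children_idx memo _
  unfold Spec_folder_aggregates_py folder_aggregates_py folder_aggregates_py_alt
  cases hmemo : (PySem.Dict.mk memo).get? folder_id with
  | some v => rfl
  | none =>
    have r0 : PySem.Set.ofList [folder_id] = [folder_id] := rfl
    have hfidU : ∀ x ∈ ([folder_id] : List String), x ∈ pvUniv folder_id (PySem.Dict.mk children_idx) := by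
      intro x hx
      rcases List.mem_singleton.mp hx with rfl
      exact Finset.mem_insert_self _ _
    have hcard : (pvUniv folder_id (PySem.Dict.mk children_idx) \ ([folder_id] : List String).toFinset).card
        ≤ ((PySem.Dict.mk children_idx).values.map List.length).sum := by
      have hsub : pvUniv folder_id (PySem.Dict.mk children_idx) \ ([folder_id] : List String).toFinset
          ⊆ (PySem.Dict.mk children_idx).values.flatten.toFinset := by
        intro y hy
        rw [Finset.mem_sdiff] at hy
        rcases Finset.mem_insert.mp hy.1 with rfl | h
        · exact absurd (by simp) hy.2
        · exact h
      calc (pvUniv folder_id (PySem.Dict.mk children_idx) \ ([folder_id] : List String).toFinset).card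
          ≤ (PySem.Dict.mk children_idx).values.flatten.toFinset.card := Finset.card_le_card hsub
        _ ≤ (PySem.Dict.mk children_idx).values.flatten.length := List.toFinset_card_le _
        _ = ((PySem.Dict.mk children_idx).values.map List.length).sum := List.length_flatten
    have hclosed : pvClosed (PySem.Dict.mk files) (PySem.Dict.mk children_idx)
        (pvSaturate (PySem.Dict.mk files) (PySem.Dict.mk children_idx)
          (((PySem.Dict.mk children_idx).values.map List.length).sum) (PySem.Set.ofList [folder_id])) := by
      refine pvSaturate_closed (fid := folder_id) _ _ ?_ ?_
      · rw [r0]; exact hfidU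
      · rw [r0]; exact hcard
    have hfidmem : folder_id ∈ pvSaturate (PySem.Dict.mk files) (PySem.Dict.mk children_idx)
        (((PySem.Dict.mk children_idx).values.map List.length).sum) (PySem.Set.ofList [folder_id]) := by
      refine pvSaturate_subset _ _ _ ?_
      rw [r0]; exact List.mem_singleton.mpr rfl
    have hsound : ∀ x ∈ pvSaturate (PySem.Dict.mk files) (PySem.Dict.mk children_idx)
        (((PySem.Dict.mk children_idx).values.map List.length).sum) (PySem.Set.ofList [folder_id]),
        pvReach (PySem.Dict.mk files) (PySem.Dict.mk children_idx) folder_id x := by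
      refine pvSaturate_sound _ _ ?_
      intro x hx
      rw [r0] at hx
      rcases List.mem_singleton.mp hx with rfl
      exact pvReach.refl _
    have hcomplete : ∀ x, pvReach (PySem.Dict.mk files) (PySem.Dict.mk children_idx) folder_id x →
        x ∈ pvSaturate (PySem.Dict.mk files) (PySem.Dict.mk children_idx)
          (((PySem.Dict.mk children_idx).values.map List.length).sum) (PySem.Set.ofList [folder_id]) := by
      intro x hx
      induction hx with
      | refl => exact hfidmem
      | step hy hz ih => exact hclosed _ ih _ hz
    have hnodup : (pvSaturate (PySem.Dict.mk files) (PySem.Dict.mk children_idx)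
        (((PySem.Dict.mk children_idx).values.map List.length).sum) (PySem.Set.ofList [folder_id])).Nodup := by
      refine pvSaturate_nodup _ _ ?_
      rw [r0]; exact List.nodup_singleton _
    set reached := pvSaturate (PySem.Dict.mk files) (PySem.Dict.mk children_idx)
      (((PySem.Dict.mk children_idx).values.map List.length).sum) (PySem.Set.ofList [folder_id]) with hreached
    have hA := pvLoopA_spec (PySem.Dict.mk files) (PySem.Dict.mk children_idx) folder_id
      [folder_id] PySem.Set.empty 0 0
      (by intro x hx; simp only [List.mem_singleton] at hx; subst hx; exact Finset.mem_insert_self _ _)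
      reached.toFinset
      (by intro u hu; exact absurd hu List.not_mem_nil)
      (by
        intro x
        rw [List.mem_toFinset]
        constructor
        · intro hx
          exact ⟨⟨folder_id, List.mem_singleton.mpr rfl, hsound x hx⟩, List.not_mem_nil⟩
        · rintro ⟨⟨r, hr, hrx⟩, -⟩
          rcases List.mem_singleton.mp hr with rfl
          exact hcomplete x hrx)
    rw [hA, pvSumFiles_eq]
    rw [Prod.fst_sum, Prod.snd_sum]
    rw [List.sum_toFinset _ hnodup, List.sum_toFinset _ hnodup]
    simp
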